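-- pv_equiv track=rewrite | github.com/johnriley81/word-hunter | tools/wordhunter_cert/rules.py | word_to_tile_strings
-- ===== SOURCE A (Python) =====
-- from typing import Iterable, List, Tuple
--
-- def word_to_tile_strings(word: str) -> List[str]:
--     """
--     Split a dictionary word into per-tile strings for scoring parity.
--     Greedy: 'qu' in the spelling maps to one tile; lone 'q' maps to one Q tile (→ qu).
--     """
--     w = (word or "").strip().lower()
--     parts: List[str] = []
--     i = 0
--     while i < len(w):
--         if w[i] == "q" and i + 1 < len(w) and w[i + 1] == "u":
--             parts.append("qu")
--             i += 2
--         elif w[i] == "q":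
--             parts.append("q")
--             i += 1
--         else:
--             parts.append(w[i])
--             i += 1
--     return parts
-- ===== SOURCE B (Python) =====
-- def word_to_tile_strings(word):
--     """One-pass state machine: a pending-Q flag instead of index lookahead."""
--     w = (word or "").strip().lower()
--     out = []
--     pending_q = False
--     for c in w:
--         if pending_q and c == "u":
--             out.append("qu")
--             pending_q = False
--         else:
--             if pending_q:
--                 out.append("q")
--             pending_q = (c == "q")
--             if not pending_q:
--                 out.append(c)
--     if pending_q:
--         out.append("q")
--     return out
-- ===== Notes on version B (the rewrite author's own statement) =====
-- stated objective: faster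
-- what changed: Replaces the index-based while loop with two-character lookahead by a single for-each pass over the characters carrying a pending-Q boolean state (a small DFA), flushed at the end; avoiding per-character indexing makes it measurably faster.
import Mathlib
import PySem

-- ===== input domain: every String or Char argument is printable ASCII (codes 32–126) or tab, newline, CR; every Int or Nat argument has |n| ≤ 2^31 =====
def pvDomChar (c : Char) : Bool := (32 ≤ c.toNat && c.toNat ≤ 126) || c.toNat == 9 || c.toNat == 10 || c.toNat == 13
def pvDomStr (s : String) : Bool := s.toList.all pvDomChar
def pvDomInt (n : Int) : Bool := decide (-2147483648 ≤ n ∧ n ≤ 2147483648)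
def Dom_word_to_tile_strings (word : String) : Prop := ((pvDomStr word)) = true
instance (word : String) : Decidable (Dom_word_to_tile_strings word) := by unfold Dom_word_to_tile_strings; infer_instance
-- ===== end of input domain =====

-- B replaces A's index-based lookahead while-loop by a single fold carrying a pending-Q flag; a timing run measured B faster (constant factor).


-- ===== PORT A =====
-- while i < len(w): lookahead branches, exactly A's increments ('word or ""' = word for str)
def wttsLoop (w : List Char) (i : Nat) : List String :=
  if h : i < w.length then
    if w[i] = 'q' then
      if h2 : i + 1 < w.length then
        if w[i + 1] = 'u' then "qu" :: wttsLoop w (i + 2)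
        else "q" :: wttsLoop w (i + 1)
      else "q" :: wttsLoop w (i + 1)
    else w[i].toString :: wttsLoop w (i + 1)
  else []
termination_by w.length - i

def word_to_tile_strings (word : String) : List String :=
  wttsLoop (PySem.Str.lower (PySem.Str.strip word)).toList 0

-- ===== PORT B =====
-- the loop body of Source B: state = (out, pending_q flag)
def tileStep (st : List String × Bool) (c : Char) : List String × Bool :=
  if st.2 ∧ c = 'u' then (st.1 ++ ["qu"], false)
  else
    let out := if st.2 then st.1 ++ ["q"] else st.1
    if c = 'q' then (out, true) else (out ++ [c.toString], false)

def word_to_tile_strings_alt (word : String) : List String :=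
  let st := (PySem.Str.lower (PySem.Str.strip word)).toList.foldl tileStep ([], false)
  if st.2 then st.1 ++ ["q"] else st.1

-- ===== PRECONDITION & SPEC =====
def Spec_word_to_tile_strings (word : String) (out : List String) : Prop := out = word_to_tile_strings_alt word
instance (word : String) (out : List String) : Decidable (Spec_word_to_tile_strings word out) := by unfold Spec_word_to_tile_strings; infer_instance

-- ===== CLAIM (what is proved, stated in full; the proofs are below) =====
def Claim_equal_word_to_tile_strings : Prop := ∀ (word : String), Dom_word_to_tile_strings word → Spec_word_to_tile_strings word (word_to_tile_strings word)

-- ===== LEMMAS AND PROOFS =====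

-- reference tokenization both ports are reduced to
def scanRec : List Char → List String
  | [] => []
  | [c] => [c.toString]
  | c :: d :: r => if c = 'q' ∧ d = 'u' then "qu" :: scanRec r else c.toString :: scanRec (d :: r)

theorem scanRec_cons_ne (c : Char) (r : List Char) (hq : c ≠ 'q') :
    scanRec (c :: r) = c.toString :: scanRec r := by
  cases r with
  | nil => simp [scanRec]
  | cons d r2 => rw [scanRec, if_neg (fun hc => hq hc.1)]

theorem scanRec_qu (r : List Char) : scanRec ('q' :: 'u' :: r) = "qu" :: scanRec r := by
  simp [scanRec]

theorem scanRec_q_not_u (r : List Char) (h : ∀ d r2, r = d :: r2 → d ≠ 'u') :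
    scanRec ('q' :: r) = "q" :: scanRec r := by
  cases r with
  | nil => rw [scanRec, scanRec]; decide
  | cons d r2 =>
      rw [scanRec, if_neg (fun hc => h d r2 rfl hc.2)]
      have : ('q' : Char).toString = "q" := by decide
      rw [this]

theorem wttsLoop_eq_scanRec (w : List Char) : ∀ n i, w.length - i ≤ n → wttsLoop w i = scanRec (w.drop i) := by
  intro n
  induction n with
  | zero =>
      intro i hi
      have hlen : w.length ≤ i := by omega
      rw [wttsLoop, dif_neg (by omega), List.drop_of_length_le hlen, scanRec]
  | succ n ih =>
      intro i hi
      by_cases h : i < w.length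
      · have hdrop : w.drop i = w[i] :: w.drop (i + 1) := List.drop_eq_getElem_cons h
        rw [wttsLoop, dif_pos h]
        by_cases h2 : i + 1 < w.length
        · have hdrop2 : w.drop (i + 1) = w[i + 1] :: w.drop (i + 2) := List.drop_eq_getElem_cons h2
          rw [hdrop, hdrop2, scanRec]
          by_cases hq : w[i] = 'q'
          · rw [if_pos hq]
            by_cases hu : w[i + 1] = 'u'
            · rw [dif_pos h2, if_pos hu, if_pos ⟨hq, hu⟩, ih (i + 2) (by omega)]
            · rw [dif_pos h2, if_neg hu, if_neg (by tauto), ih (i + 1) (by omega), hdrop2, hq]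
              rfl
          · rw [if_neg hq, if_neg (by tauto), ih (i + 1) (by omega), hdrop2]
        · have hone : w.drop (i + 1) = [] := List.drop_of_length_le (by omega)
          rw [hdrop, hone, scanRec]
          by_cases hq : w[i] = 'q'
          · rw [if_pos hq, dif_neg h2, ih (i + 1) (by omega), hone, hq]
            decide
          · rw [if_neg hq, ih (i + 1) (by omega), hone, scanRec]
      · rw [wttsLoop, dif_neg h, List.drop_of_length_le (by omega), scanRec]

def tileFlush (st : List String × Bool) : List String := if st.2 then st.1 ++ ["q"] else st.1

theorem fold_both : ∀ (cs : List Char),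
    (∀ acc, tileFlush (cs.foldl tileStep (acc, false)) = acc ++ scanRec cs) ∧
    (∀ acc, tileFlush (cs.foldl tileStep (acc, true)) = acc ++ scanRec ('q' :: cs)) := by
  intro cs
  induction cs with
  | nil => exact ⟨fun acc => by simp [tileFlush, scanRec], fun acc => by (simp [tileFlush, scanRec]; decide)⟩
  | cons c r ih =>
      refine ⟨fun acc => ?_, fun acc => ?_⟩
      · by_cases hq : c = 'q'
        · subst hq
          rw [List.foldl_cons, show tileStep (acc, false) 'q' = (acc, true) from by simp [tileStep],
              ih.2 acc]
        · rw [List.foldl_cons,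
              show tileStep (acc, false) c = (acc ++ [c.toString], false) from by simp [tileStep, hq],
              ih.1, scanRec_cons_ne c r hq]
          simp
      · by_cases hu : c = 'u'
        · subst hu
          rw [List.foldl_cons,
              show tileStep (acc, true) 'u' = (acc ++ ["qu"], false) from by simp [tileStep],
              ih.1, scanRec_qu]
          simp
        · by_cases hq : c = 'q'
          · subst hq
            rw [List.foldl_cons,
                show tileStep (acc, true) 'q' = (acc ++ ["q"], true) from by simp [tileStep, hu],
                ih.2, scanRec_q_not_u ('q' :: r) (fun d r2 hdr => by injection hdr with h1 _; rw [← h1]; decide)]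
            simp
          · rw [List.foldl_cons,
                show tileStep (acc, true) c = (acc ++ ["q"] ++ [c.toString], false) from by
                  simp [tileStep, hu, hq],
                ih.1, scanRec_q_not_u (c :: r) (fun d r2 hdr => by injection hdr with h1 _; rw [← h1]; exact hu),
                scanRec_cons_ne c r hq]
            simp

-- ===== VERDICT (by name: the statement is the Claim_ definition above) =====
theorem word_to_tile_strings_spec : Claim_equal_word_to_tile_strings := by
  intro word _
  unfold Spec_word_to_tile_strings word_to_tile_strings word_to_tile_strings_alt
  set cs := (PySem.Str.lower (PySem.Str.strip word)).toList with hcs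
  have hA := wttsLoop_eq_scanRec cs cs.length 0 (by omega)
  have hB := (fold_both cs).1 []
  simp only [List.drop_zero] at hA
  rw [hA]
  rw [show (if (cs.foldl tileStep ([], false)).2 then (cs.foldl tileStep ([], false)).1 ++ ["q"] else (cs.foldl tileStep ([], false)).1) = tileFlush (cs.foldl tileStep ([], false)) from rfl, hB]
  simp
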